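-- pv_equiv track=rewrite | github.com/PierreFromJicin/the_birth_number_validation | number_parsing.py | end_f
-- ===== SOURCE A (Python) =====
-- def end_f(param):
--     i = param
--     n = t = y = 0
--     if len(i) == 10:  # length is 10
--         for _i in range(0, 10):
--             t = t * 10 + i[_i]
--         if t % 11 == 0:  # modulo 11 must be 0
--             return True
--         else:
--             return False
--     elif len(i) == 9:  # length is 9
--         for _i in range(6, 9):
--             n = n * 10 + i[_i]
--         if n == 0:
--             return False
--         else:
--             for _i in range(0, 2):
--                 y = y * 10 + i[_i]
--             if y < 54:  # year lower than 1954
--                 return True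
--             else:
--                 return False
--     else:
--         return False
-- ===== SOURCE B (Python) =====
-- def end_f(param):
--     i = param
--     if len(i) == 10:
--         # divisibility by 11 via alternating digit sum: the built number is congruent mod 11
--         s = (i[1] + i[3] + i[5] + i[7] + i[9]) - (i[0] + i[2] + i[4] + i[6] + i[8])
--         return s % 11 == 0
--     elif len(i) == 9:
--         n = i[6] * 100 + i[7] * 10 + i[8]
--         if n == 0:
--             return False
--         y = i[0] * 10 + i[1]
--         return y < 54
--     else:
--         return False
-- ===== Notes on version B (the rewrite author's own statement) =====
-- stated objective: idiomatic
-- what changed: Length-10 branch replaces the digit-by-digit construction of the full 10-digit number with the alternating-sum divisibility-by-11 test, and the length-9 branch replaces both accumulator loops with direct positional arithmetic.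
import Mathlib
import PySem

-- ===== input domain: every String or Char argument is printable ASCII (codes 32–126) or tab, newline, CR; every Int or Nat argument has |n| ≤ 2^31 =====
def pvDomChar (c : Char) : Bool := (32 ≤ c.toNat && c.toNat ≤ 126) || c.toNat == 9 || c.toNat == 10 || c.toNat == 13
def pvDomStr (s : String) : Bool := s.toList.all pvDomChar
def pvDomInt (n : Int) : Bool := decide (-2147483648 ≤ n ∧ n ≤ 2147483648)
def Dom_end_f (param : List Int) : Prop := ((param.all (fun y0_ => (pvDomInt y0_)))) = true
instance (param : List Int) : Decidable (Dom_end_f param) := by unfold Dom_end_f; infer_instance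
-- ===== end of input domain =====

-- B replaces the digit-by-digit built number with the alternating-sum mod-11 test (length 10)
-- and the accumulator loops with direct positional arithmetic (length 9); objective: idiomatic.


-- ===== PORT A =====
-- loop indices are always in range (the length was just checked), so pyGet? never misses
-- and the .getD 0 default is never taken; A is total.
def end_f (param : List Int) : Bool :=
  if param.length = 10 then
    let t := (PySem.List.pyRange 0 10 1).foldl
      (fun t k => t * 10 + (PySem.List.pyGet? param k).getD 0) 0
    PySem.Int.mod t 11 == 0
  else if param.length = 9 then
    let n := (PySem.List.pyRange 6 9 1).foldl
      (fun n k => n * 10 + (PySem.List.pyGet? param k).getD 0) 0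
    if n == 0 then false
    else
      let y := (PySem.List.pyRange 0 2 1).foldl
        (fun y k => y * 10 + (PySem.List.pyGet? param k).getD 0) 0
      y < 54
  else false

-- ===== PORT B =====
def end_f_alt (param : List Int) : Bool :=
  let g := fun (k : Int) => (PySem.List.pyGet? param k).getD 0
  if param.length = 10 then
    let s := (g 1 + g 3 + g 5 + g 7 + g 9) - (g 0 + g 2 + g 4 + g 6 + g 8)
    PySem.Int.mod s 11 == 0
  else if param.length = 9 then
    let n := g 6 * 100 + g 7 * 10 + g 8
    if n == 0 then false
    else
      let y := g 0 * 10 + g 1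
      y < 54
  else false

-- ===== PRECONDITION & SPEC =====
def Spec_end_f (param : List Int) (out : Bool) : Prop := out = end_f_alt param
instance (param : List Int) (out : Bool) : Decidable (Spec_end_f param out) := by unfold Spec_end_f; infer_instance

-- ===== CLAIM (what is proved, stated in full; the proofs are below) =====
def Claim_equal_end_f : Prop := ∀ (param : List Int), Dom_end_f param → Spec_end_f param (end_f param)

-- ===== LEMMAS AND PROOFS =====

lemma boolmod_congr (T S : Int) (h : PySem.Int.mod T 11 = 0 ↔ PySem.Int.mod S 11 = 0) :
    (PySem.Int.mod T 11 == 0) = (PySem.Int.mod S 11 == 0) := by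
  rw [Bool.eq_iff_iff]; simp only [beq_iff_eq]; exact h

-- the built 10-digit number is congruent mod 11 to the alternating digit sum (10 ≡ -1 mod 11)
lemma ten_case (a0 a1 a2 a3 a4 a5 a6 a7 a8 a9 : Int) :
    end_f [a0,a1,a2,a3,a4,a5,a6,a7,a8,a9] = end_f_alt [a0,a1,a2,a3,a4,a5,a6,a7,a8,a9] := by
  have hA : end_f [a0,a1,a2,a3,a4,a5,a6,a7,a8,a9]
      = (PySem.Int.mod ((((((((((0*10+a0)*10+a1)*10+a2)*10+a3)*10+a4)*10+a5)*10+a6)*10+a7)*10+a8)*10+a9) 11 == 0) := rfl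
  have hB : end_f_alt [a0,a1,a2,a3,a4,a5,a6,a7,a8,a9]
      = (PySem.Int.mod ((a1+a3+a5+a7+a9)-(a0+a2+a4+a6+a8)) 11 == 0) := rfl
  rw [hA, hB]
  apply boolmod_congr
  rw [PySem.Int.mod_eq_emod_of_pos (by norm_num), PySem.Int.mod_eq_emod_of_pos (by norm_num)]
  omega

lemma nine_case (a0 a1 a2 a3 a4 a5 a6 a7 a8 : Int) :
    end_f [a0,a1,a2,a3,a4,a5,a6,a7,a8] = end_f_alt [a0,a1,a2,a3,a4,a5,a6,a7,a8] := by
  have hA : end_f [a0,a1,a2,a3,a4,a5,a6,a7,a8]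
      = (if (((0*10+a6)*10+a7)*10+a8 == 0) then false else ((0*10+a0)*10+a1 < 54 : Bool)) := rfl
  have hB : end_f_alt [a0,a1,a2,a3,a4,a5,a6,a7,a8]
      = (if (a6*100+a7*10+a8 == 0) then false else (a0*10+a1 < 54 : Bool)) := rfl
  rw [hA, hB]
  have hn : ((0*10+a6)*10+a7)*10+a8 = a6*100+a7*10+a8 := by ring
  have hy : (0*10+a0)*10+a1 = a0*10+a1 := by ring
  rw [hn, hy]

-- ===== VERDICT (by name: the statement is the Claim_ definition above) =====
theorem end_f_spec : Claim_equal_end_f := by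
  intro param _
  unfold Spec_end_f
  rcases param with _ | ⟨a0, _ | ⟨a1, _ | ⟨a2, _ | ⟨a3, _ | ⟨a4, _ | ⟨a5, _ | ⟨a6, _ | ⟨a7, _ | ⟨a8, _ | ⟨a9, _ | ⟨a10, rest⟩⟩⟩⟩⟩⟩⟩⟩⟩⟩⟩
  case cons.cons.cons.cons.cons.cons.cons.cons.cons.nil => exact nine_case a0 a1 a2 a3 a4 a5 a6 a7 a8
  case cons.cons.cons.cons.cons.cons.cons.cons.cons.cons.nil => exact ten_case a0 a1 a2 a3 a4 a5 a6 a7 a8 a9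
  all_goals simp [end_f, end_f_alt]
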